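-- pv_equiv track=rewrite | github.com/AkshdeepSharma/Classroom | EPI/Arrays/Array Advancement.py | array_advancement
-- ===== SOURCE A (Python) =====
-- def array_advancement(A):
--     furthest_travelled = 0
--     total_distance = len(A) - 1
--     i = 0
--     while i <= furthest_travelled < total_distance:
--         furthest_travelled = max(furthest_travelled, A[i] + i)
--         i += 1
--     return furthest_travelled >= total_distance
-- ===== SOURCE B (Python) =====
-- def array_advancement(A):
--     goal = len(A) - 1
--     for i in reversed(range(len(A))):
--         if i + A[i] >= goal:
--             goal = i
--     return goal <= 0
-- ===== Notes on version B (the rewrite author's own statement) =====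
-- stated objective: alternative
-- what changed: Replaces the forward running-maximum scan (with early exit) by the backward greedy: scan indices from the end keeping the leftmost position known to reach the end, return goal <= 0.
import Mathlib
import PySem

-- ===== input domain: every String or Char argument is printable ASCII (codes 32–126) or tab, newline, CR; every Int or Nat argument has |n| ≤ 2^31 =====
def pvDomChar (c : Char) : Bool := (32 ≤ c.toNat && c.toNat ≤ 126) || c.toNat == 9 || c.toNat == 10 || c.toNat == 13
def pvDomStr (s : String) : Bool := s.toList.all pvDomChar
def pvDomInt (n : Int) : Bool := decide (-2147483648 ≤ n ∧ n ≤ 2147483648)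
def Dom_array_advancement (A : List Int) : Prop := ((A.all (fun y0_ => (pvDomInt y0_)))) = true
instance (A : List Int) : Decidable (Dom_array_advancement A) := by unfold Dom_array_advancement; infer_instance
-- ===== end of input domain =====

-- B replaces A's forward running-maximum scan by the backward greedy (leftmost index known to reach the end); same O(n) cost, different algorithm.


-- ===== PORT A =====
-- A's while loop; fuel = A.length is enough (i increments each iteration and the
-- loop continues only while i ≤ furthest < len(A)-1).  A[i] is always in range
-- when read (0 ≤ i ≤ furthest < len-1), so pyGetD is exact there.
def aLoop (A : List Int) (total : Int) : Nat → Int → Int → Int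
  | 0, furthest, _ => furthest
  | fuel+1, furthest, i =>
    if i ≤ furthest ∧ furthest < total then
      aLoop A total fuel (max furthest (PySem.List.pyGetD A i 0 + i)) (i + 1)
    else furthest

def array_advancement (A : List Int) : Bool :=
  let total : Int := (A.length : Int) - 1
  decide (aLoop A total A.length 0 0 ≥ total)

-- ===== PORT B =====
-- backward greedy: goal = len-1; for i from len-1 down to 0, if i + A[i] ≥ goal
-- then goal = i; return goal ≤ 0.  foldr over zipIdx processes indices downward.
def array_advancement_alt (A : List Int) : Bool :=
  let goal : Int :=
    A.zipIdx.foldr (fun p g => if (p.2 : Int) + p.1 ≥ g then (p.2 : Int) else g)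
      ((A.length : Int) - 1)
  decide (goal ≤ 0)

-- ===== PRECONDITION & SPEC =====
def Spec_array_advancement (A : List Int) (out : Bool) : Prop := out = array_advancement_alt A
instance (A : List Int) (out : Bool) : Decidable (Spec_array_advancement A out) := by unfold Spec_array_advancement; infer_instance

-- ===== CLAIM (what is proved, stated in full; the proofs are below) =====
def Claim_equal_array_advancement : Prop := ∀ (A : List Int), Dom_array_advancement A → Spec_array_advancement A (array_advancement A)

-- ===== LEMMAS AND PROOFS =====

-- prefix "furthest" of A's loop: M A i = max(0, max_{t<i} (t + A[t]))
def aMax (A : List Int) : Nat → Int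
  | 0 => 0
  | i+1 => max (aMax A i) ((i : Int) + A.getD i 0)

-- proof-side backward greedy value: gb A n j = goal after processing i = n-1 … j
def gb (A : List Int) (n : Nat) (j : Nat) : Nat :=
  if h : n ≤ j then n - 1
  else
    let g := gb A n (j+1)
    if (j : Int) + A.getD j 0 ≥ (g : Int) then j else g
  termination_by n - j

-- the common characterisation: no stuck point from j on
def NoStuck (A : List Int) (n j : Nat) : Prop :=
  ∀ k : Nat, j ≤ k → k + 1 < n → ∃ i : Nat, j ≤ i ∧ i ≤ k ∧ (i : Int) + A.getD i 0 ≥ (k : Int) + 1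

theorem aMax_mono (A : List Int) (a b : Nat) (h : a ≤ b) : aMax A a ≤ aMax A b := by
  induction b with
  | zero => simp [Nat.le_zero.mp h]
  | succ b ih =>
    rcases Nat.lt_or_ge a (b+1) with h' | h'
    · exact le_trans (ih (Nat.lt_succ_iff.mp h')) (le_max_left _ _)
    · have : a = b + 1 := le_antisymm h h'
      simp [this]

theorem aMax_ge_iff (A : List Int) (m : Nat) (c : Int) (hc : 0 < c) :
    aMax A m ≥ c ↔ ∃ t : Nat, t < m ∧ (t : Int) + A.getD t 0 ≥ c := by
  induction m with
  | zero => simp [aMax]; omega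
  | succ m ih =>
    simp only [aMax, ge_iff_le, le_max_iff]
    constructor
    · rintro (h | h)
      · obtain ⟨t, ht, h⟩ := ih.mp h
        exact ⟨t, Nat.lt_succ_of_lt ht, h⟩
      · exact ⟨m, Nat.lt_succ_self m, h⟩
    · rintro ⟨t, ht, h⟩
      rcases Nat.lt_or_ge t m with h' | h'
      · exact Or.inl (ih.mpr ⟨t, h', h⟩)
      · have : t = m := by omega
        exact Or.inr (this ▸ h)

-- A's loop from state (aMax A i, i): result ≥ total ↔ no stuck point ≥ i
theorem aLoop_iff (A : List Int) :
    ∀ (fuel i : Nat), A.length - i ≤ fuel → (i : Int) ≤ aMax A i →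
      (aLoop A ((A.length : Int) - 1) fuel (aMax A i) (i : Int) ≥ (A.length : Int) - 1 ↔
        ∀ k : Nat, i ≤ k → k + 1 < A.length → (k : Int) + 1 ≤ aMax A (k + 1)) := by
  intro fuel
  induction fuel with
  | zero =>
    intro i hfuel hi
    have hni : A.length ≤ i := by omega
    simp only [aLoop]
    constructor
    · intro _ k hk hkn; omega
    · intro _
      have : (A.length : Int) ≤ (i : Int) := by exact_mod_cast hni
      omega
  | succ fuel ih =>
    intro i hfuel hi
    simp only [aLoop]
    by_cases hcont : (i : Int) ≤ aMax A i ∧ aMax A i < (A.length : Int) - 1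
    · rw [if_pos hcont]
      have hin : i + 1 < A.length := by
        have := hcont.2; omega
      have hstep : max (aMax A i) (PySem.List.pyGetD A (i : Int) 0 + (i : Int)) = aMax A (i+1) := by
        have : PySem.List.pyGetD A (i : Int) 0 = A.getD i 0 := by
          simp [PySem.List.pyGetD_natCast]
        rw [this, aMax]
        omega
      have hicast : (i : Int) + 1 = ((i + 1 : Nat) : Int) := by push_cast; ring
      rw [hstep, hicast]
      by_cases hnext : ((i + 1 : Nat) : Int) ≤ aMax A (i + 1)
      · rw [ih (i+1) (by omega) hnext]
        constructor
        · intro h k hk hkn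
          rcases Nat.lt_or_ge i k with h' | h'
          · exact h k h' hkn
          · have : k = i := by omega
            subst this
            exact_mod_cast hnext
        · intro h k hk hkn
          exact h k (Nat.le_of_lt hk) hkn
      · -- stuck at i+1: next check fails, loop exits with aMax A (i+1) < total
        have hstuck : aMax A (i+1) < ((i+1 : Nat) : Int) := by omega
        have hlt : aMax A (i+1) < (A.length : Int) - 1 := by
          have : ((i : Nat) : Int) + 1 ≤ (A.length : Int) - 1 := by exact_mod_cast (by omega : (i:Int) + 1 ≤ (A.length : Int) - 1)
          push_cast at hstuck ⊢
          omega
        have hres : aLoop A ((A.length : Int) - 1) fuel (aMax A (i+1)) ((i+1 : Nat) : Int) = aMax A (i+1) := by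
          cases fuel with
          | zero => simp [aLoop]
          | succ f =>
            simp only [aLoop]
            rw [if_neg]
            intro ⟨h1, _⟩
            omega
        rw [hres]
        constructor
        · intro h; omega
        · intro h
          exfalso
          have := h i (le_refl i) hin
          push_cast at this hstuck
          omega
    · rw [if_neg hcont]
      have hge : aMax A i ≥ (A.length : Int) - 1 := by
        rcases not_and_or.mp hcont with h | h
        · exact absurd hi h
        · omega
      constructor
      · intro _ k hk hkn
        have h1 : aMax A i ≤ aMax A (k+1) := aMax_mono A i (k+1) (by omega)
        have h2 : ((k : Int) + 1) ≤ (A.length : Int) - 1 := by exact_mod_cast (by omega : (k:Int)+1 ≤ (A.length:Int)-1)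
        omega
      · intro _; exact hge

-- gb unfolding for j < n
theorem gb_lt (A : List Int) (n j : Nat) (h : j < n) :
    gb A n j = if (j : Int) + A.getD j 0 ≥ (gb A n (j+1) : Int) then j else gb A n (j+1) := by
  rw [gb]
  simp [Nat.not_le.mpr h]

theorem gb_ge_n (A : List Int) (n j : Nat) (h : n ≤ j) : gb A n j = n - 1 := by
  rw [gb]; simp [h]

-- bounds: j ≤ n-1 → j ≤ gb j ≤ n-1
theorem gb_bounds (A : List Int) (n : Nat) :
    ∀ d j, n - 1 - j ≤ d → j ≤ n - 1 → 1 ≤ n → j ≤ gb A n j ∧ gb A n j ≤ n - 1 := by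
  intro d
  induction d with
  | zero =>
    intro j hd hj hn
    have : j = n - 1 := by omega
    subst this
    rw [gb_lt A n (n-1) (by omega), gb_ge_n A n (n-1+1) (by omega)]
    split <;> omega
  | succ d ih =>
    intro j hd hj hn
    rcases Nat.lt_or_ge j (n-1) with h' | h'
    · rw [gb_lt A n j (by omega)]
      have := ih (j+1) (by omega) (by omega) hn
      split <;> omega
    · have : j = n - 1 := by omega
      subst this
      rw [gb_lt A n (n-1) (by omega), gb_ge_n A n (n-1+1) (by omega)]
      split <;> omega

theorem gb_le_n1 (A : List Int) (n j : Nat) (hj : j ≤ n - 1) (hn : 1 ≤ n) :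
    j ≤ gb A n j ∧ gb A n j ≤ n - 1 :=
  gb_bounds A n (n - 1 - j) j (le_refl _) hj hn

-- fixed point: gb (gb j) = gb j
theorem gb_fix (A : List Int) (n : Nat) (hn : 1 ≤ n) :
    ∀ d j, n - 1 - j ≤ d → j ≤ n - 1 → gb A n (gb A n j) = gb A n j := by
  intro d
  induction d with
  | zero =>
    intro j hd hj
    have : j = n - 1 := by omega
    subst this
    have h := gb_le_n1 A n (n-1) (le_refl _) hn
    have : gb A n (n-1) = n - 1 := by omega
    rw [this]; exact this
  | succ d ih =>
    intro j hd hj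
    rcases Nat.lt_or_ge j (n-1) with h' | h'
    · rw [gb_lt A n j (by omega)]
      split
      · rw [gb_lt A n j (by omega)]
        split
        · rfl
        · omega
      · exact ih (j+1) (by omega) (by omega)
    · have : j = n - 1 := by omega
      subst this
      have h := gb_le_n1 A n (n-1) (le_refl _) hn
      have : gb A n (n-1) = n - 1 := by omega
      rw [this]; exact this

-- minimality: a fixed point j bounds gb at any i ≤ j
theorem gb_min (A : List Int) (n : Nat) (hn : 1 ≤ n) :
    ∀ d i j, j - i ≤ d → i ≤ j → j ≤ n - 1 → gb A n j = j → gb A n i ≤ j := by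
  intro d
  induction d with
  | zero =>
    intro i j hd hij hj hfix
    have : i = j := by omega
    subst this; omega
  | succ d ih =>
    intro i j hd hij hj hfix
    rcases Nat.lt_or_ge i j with h' | h'
    · rw [gb_lt A n i (by omega)]
      have := ih (i+1) j (by omega) (by omega) hj hfix
      split <;> omega
    · have : i = j := by omega
      subst this; omega

-- the crux: gb j = j ↔ no stuck point from j on
theorem gb_iff_noStuck (A : List Int) (n : Nat) (hn : 1 ≤ n) :
    ∀ d j, n - 1 - j ≤ d → j ≤ n - 1 → (gb A n j = j ↔ NoStuck A n j) := by
  intro d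
  induction d with
  | zero =>
    intro j hd hj
    have : j = n - 1 := by omega
    subst this
    have h := gb_le_n1 A n (n-1) (le_refl _) hn
    constructor
    · intro _ k hk hkn; omega
    · intro _; omega
  | succ d ih =>
    intro j hd hj
    rcases Nat.lt_or_ge j (n-1) with hlt | hge
    case inr =>
      have : j = n - 1 := by omega
      subst this
      have h := gb_le_n1 A n (n-1) (le_refl _) hn
      constructor
      · intro _ k hk hkn; omega
      · intro _; omega
    case inl =>
      set g := gb A n (j+1) with hg
      have hgb : j + 1 ≤ g ∧ g ≤ n - 1 := gb_le_n1 A n (j+1) (by omega) hn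
      have hgfix : gb A n g = g := gb_fix A n hn (n - 1 - (j+1)) (j+1) (le_refl _) (by omega)
      have hunf := gb_lt A n j (by omega)
      constructor
      · intro hfix
        have hcond : (j : Int) + A.getD j 0 ≥ (g : Int) := by
          by_contra hc
          rw [hunf, if_neg hc] at hfix
          omega
        have hPg : NoStuck A n g := (ih g (by omega) hgb.2).mp hgfix
        intro k hk hkn
        rcases Nat.lt_or_ge k g with h' | h'
        · refine ⟨j, le_refl j, hk, ?_⟩
          have : ((k : Nat) : Int) + 1 ≤ (g : Int) := by exact_mod_cast (by omega : k + 1 ≤ g)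
          omega
        · obtain ⟨i, hgi, hik, hval⟩ := hPg k h' hkn
          exact ⟨i, by omega, hik, hval⟩
      · intro hP
        have hcond : (j : Int) + A.getD j 0 ≥ (g : Int) := by
          by_contra hc
          push Not at hc
          -- use the stuck check at k = g - 1
          obtain ⟨i, hji, hik, hval⟩ := hP (g-1) (by omega) (by omega)
          have hgcast : ((g - 1 : Nat) : Int) + 1 = (g : Int) := by
            have : 1 ≤ g := by omega
            push_cast [this]; ring
          rw [hgcast] at hval
          have hij : j < i := by
            rcases Nat.lt_or_ge j i with h | h
            · exact h
            · exfalso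
              have : i = j := by omega
              subst this
              omega
          -- gb (i+1) ≤ g, so the update fires at i: gb i = i
          have h1 : gb A n (i+1) ≤ g := gb_min A n hn (g - (i+1)) (i+1) g (le_refl _) (by omega) hgb.2 hgfix
          have h2 : gb A n i = i := by
            rw [gb_lt A n i (by omega)]
            rw [if_pos]
            have : ((gb A n (i+1) : Nat) : Int) ≤ (g : Int) := by exact_mod_cast h1
            omega
          -- but then gb (j+1) ≤ i < g, contradiction
          have h3 : gb A n (j+1) ≤ i := gb_min A n hn (i - (j+1)) (j+1) i (le_refl _) (by omega) (by omega) h2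
          omega
        rw [hunf, if_pos hcond]

-- B's foldr equals gb at index 0
theorem foldr_gb (A : List Int) (hn : 1 ≤ A.length) :
    ∀ (xs : List Int) (j : Nat), j + xs.length = A.length → xs = A.drop j →
      (xs.zipIdx j).foldr
          (fun p g => if (p.2 : Int) + p.1 ≥ g then (p.2 : Int) else g)
          ((A.length : Int) - 1)
        = (gb A A.length j : Int) := by
  intro xs
  induction xs with
  | nil =>
    intro j hlen _
    simp only [List.zipIdx, List.foldr]
    have : j = A.length := by simpa using hlen
    subst this
    rw [gb_ge_n A A.length A.length (le_refl _)]
    push_cast [hn]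
    omega
  | cons x xs ih =>
    intro j hlen hdrop
    have hj : j < A.length := by simp at hlen; omega
    have hx : A.getD j 0 = x := by
      have h1 : A[j]? = some x := by
        have h0 : (A.drop j)[0]? = some x := by rw [← hdrop]; rfl
        simpa [List.getElem?_drop] using h0
      simp [List.getD_eq_getElem?_getD, h1]
    have hxs : xs = A.drop (j+1) := by
      have h1 : (x :: xs).drop 1 = (A.drop j).drop 1 := by rw [hdrop]
      simpa [List.drop_drop, Nat.add_comm] using h1
    simp only [List.zipIdx_cons, List.foldr_cons]
    rw [ih (j+1) (by simp at hlen ⊢; omega) hxs]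
    rw [gb_lt A A.length j hj, hx]
    by_cases hc : (j : Int) + x ≥ (gb A A.length (j+1) : Int)
    · simp [hc]
    · simp [hc]

-- assembled: each port decides the same proposition
theorem eq_on_all (A : List Int) : array_advancement A = array_advancement_alt A := by
  rcases Nat.eq_zero_or_pos A.length with hn | hn
  · have : A = [] := List.eq_nil_of_length_eq_zero hn
    subst this
    decide
  · unfold array_advancement array_advancement_alt
    have hB := foldr_gb A hn A 0 (by simp) (by simp)
    simp only [hB]
    apply decide_eq_decide.mpr
    have hA0 : aMax A 0 = 0 := rfl
    have hA := aLoop_iff A A.length 0 (by omega) (by simp [hA0])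
    rw [hA0] at hA
    have h0 : ((0 : Nat) : Int) = (0 : Int) := rfl
    rw [h0] at hA
    rw [hA]
    have hgb := gb_iff_noStuck A A.length hn (A.length - 1) 0 (le_refl _) (by omega)
    have hbounds := gb_le_n1 A A.length 0 (by omega) hn
    constructor
    · intro h
      have : NoStuck A A.length 0 := by
        intro k hk hkn
        have hex := (aMax_ge_iff A (k+1) ((k:Int)+1) (by omega)).mp (h k hk hkn)
        obtain ⟨t, ht, hval⟩ := hex
        exact ⟨t, by omega, by omega, hval⟩
      have : gb A A.length 0 = 0 := hgb.mpr this
      omega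
    · intro h
      have hfix : gb A A.length 0 = 0 := by omega
      have hNS := hgb.mp hfix
      intro k hk hkn
      refine (aMax_ge_iff A (k+1) ((k:Int)+1) (by omega)).mpr ?_
      obtain ⟨i, _, hik, hval⟩ := hNS k hk hkn
      exact ⟨i, by omega, hval⟩

-- ===== VERDICT (by name: the statement is the Claim_ definition above) =====
theorem array_advancement_spec : Claim_equal_array_advancement := by
  intro A _
  unfold Spec_array_advancement
  exact eq_on_all A
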